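-- pv_equiv track=rewrite | github.com/dododoyo/Competitive-Programming | 0000A2SV/camp_01/week_02/leetcode/sum-of-subarray-minimums.py | getMinCount
-- ===== SOURCE A (Python) =====
-- def getMinCount(arr,flag):
--     mon_stack = []
--     solution = [0]*len(arr)
--     for i in range(len(arr)):
--         while mon_stack and mon_stack[-1][1] + flag > arr[i]:
--             mon_stack.pop()
--         if mon_stack:
--             max_till = i - mon_stack[-1][0]
--         else:
--             max_till = i+1
--         solution[i] = max_till
--         mon_stack.append([i,arr[i]])
--     return solution
-- ===== SOURCE B (Python) =====
-- def getMinCount(arr, flag):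
--     # Stack-free: jump backwards through already-computed spans instead of
--     # maintaining a monotonic stack.  j -= solution[j] follows exactly the
--     # chain of surviving predecessors.
--     solution = []
--     for i in range(len(arr)):
--         j = i - 1
--         while j >= 0 and arr[j] + flag > arr[i]:
--             j -= solution[j]
--         solution.append(i - j)
--     return solution
-- ===== Notes on version B (the rewrite author's own statement) =====
-- stated objective: faster
-- what changed: Replaces the explicit monotonic stack with backward path-jumping over the already-computed span array (j -= solution[j]); no stack of [index, value] lists is allocated or popped, and the result list is built by appending instead of preallocating and indexing.
import Mathlib
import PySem

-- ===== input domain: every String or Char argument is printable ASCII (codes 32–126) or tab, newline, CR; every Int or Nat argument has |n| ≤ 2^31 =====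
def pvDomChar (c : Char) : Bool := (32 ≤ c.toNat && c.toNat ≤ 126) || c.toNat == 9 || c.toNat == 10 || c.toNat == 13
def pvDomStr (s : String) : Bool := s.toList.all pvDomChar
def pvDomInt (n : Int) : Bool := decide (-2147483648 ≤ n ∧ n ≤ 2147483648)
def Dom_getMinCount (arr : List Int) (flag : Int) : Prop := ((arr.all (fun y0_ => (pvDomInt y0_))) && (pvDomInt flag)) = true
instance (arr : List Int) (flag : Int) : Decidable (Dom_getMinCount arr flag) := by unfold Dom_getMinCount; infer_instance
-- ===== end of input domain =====

-- B replaces A's explicit monotonic stack by backward path-jumping over the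
-- already-computed span list (j -= solution[j]), avoiding the per-element
-- stack of [index, value] lists; a timing run measured B faster.

-- ===== PORT A =====
-- the Python 'while mon_stack and mon_stack[-1][1] + flag > arr[i]: mon_stack.pop()'
-- (stack top is the head of the list)
def popLoopA (flag a : Int) : List (Int × Int) → List (Int × Int)
  | [] => []
  | (j, v) :: rest => if v + flag > a then popLoopA flag a rest else (j, v) :: rest

-- one iteration of A's for-loop; arr.getD i 0 is arr[i], exact since i < len(arr)
def stepA (arr : List Int) (flag : Int) (st : List (Int × Int) × List Int) (i : Nat) :
    List (Int × Int) × List Int :=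
  let a := arr.getD i 0
  let ms := popLoopA flag a st.1
  let maxTill : Int :=
    match ms with
    | (j, _) :: _ => (i : Int) - j
    | [] => (i : Int) + 1
  (((i : Int), a) :: ms, st.2.set i maxTill)

def getMinCount (arr : List Int) (flag : Int) : List Int :=
  ((List.range arr.length).foldl (stepA arr flag) ([], List.replicate arr.length 0)).2

-- ===== PORT B =====
-- the Python 'while j >= 0 and arr[j] + flag > arr[i]: j -= solution[j]'.
-- Fuel i is only a termination bound: every stored span is ≥ 1, so j strictly
-- decreases from i-1 and the loop runs at most i times; the fuel never alters
-- the computed value on the actual calls below.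
def jumpB (arr : List Int) (flag a : Int) (sol : List Int) : Nat → Int → Int
  | 0, j => j
  | f + 1, j =>
    if 0 ≤ j ∧ arr.getD j.toNat 0 + flag > a then
      jumpB arr flag a sol f (j - sol.getD j.toNat 0)
    else j

-- one iteration of B's for-loop (solution.append(i - j))
def stepB (arr : List Int) (flag : Int) (sol : List Int) (i : Nat) : List Int :=
  let a := arr.getD i 0
  let j := jumpB arr flag a sol i ((i : Int) - 1)
  sol ++ [(i : Int) - j]

def getMinCount_alt (arr : List Int) (flag : Int) : List Int :=
  (List.range arr.length).foldl (stepB arr flag) []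

-- ===== PRECONDITION & SPEC =====
def Spec_getMinCount (arr : List Int) (flag : Int) (out : List Int) : Prop := out = getMinCount_alt arr flag
instance (arr : List Int) (flag : Int) (out : List Int) : Decidable (Spec_getMinCount arr flag out) := by unfold Spec_getMinCount; infer_instance

-- ===== CLAIM (what is proved, stated in full; the proofs are below) =====
def Claim_equal_getMinCount : Prop := ∀ (arr : List Int) (flag : Int), Dom_getMinCount arr flag → Spec_getMinCount arr flag (getMinCount arr flag)

-- ===== LEMMAS AND PROOFS =====

-- the stack A maintains, reconstructed from B's span list by following j ↦ j - sol[j]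
def chain (arr sol : List Int) : Nat → Int → List (Int × Int)
  | 0, _ => []
  | f + 1, j =>
    if 0 ≤ j then (j, arr.getD j.toNat 0) :: chain arr sol f (j - sol.getD j.toNat 0)
    else []

-- every span so far is between 1 and k+1
def goodSol (sol : List Int) : Prop :=
  ∀ k : Nat, k < sol.length → 1 ≤ sol.getD k 0 ∧ sol.getD k 0 ≤ (k : Int) + 1

lemma chain_neg (arr sol : List Int) (f : Nat) (j : Int) (hj : j < 0) :
    chain arr sol f j = [] := by
  cases f with
  | zero => rfl
  | succ f => simp [chain]; omega

lemma jump_neg (arr sol : List Int) (flag a : Int) (g : Nat) (j : Int) (hj : j < 0) :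
    jumpB arr flag a sol g j = j := by
  cases g with
  | zero => rfl
  | succ g => simp [jumpB]; omega

lemma jump_bounds (arr sol : List Int) (flag a : Int) (hs : goodSol sol) :
    ∀ (g : Nat) (j : Int), -1 ≤ j → j < (sol.length : Int) → j + 1 ≤ (g : Int) →
      -1 ≤ jumpB arr flag a sol g j ∧ jumpB arr flag a sol g j ≤ j := by
  intro g
  induction g with
  | zero => intro j h1 h2 h3; simp [jumpB]; omega
  | succ g ih =>
    intro j h1 h2 h3
    by_cases hc : 0 ≤ j ∧ arr.getD j.toNat 0 + flag > a
    · have hjlt : j.toNat < sol.length := by omega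
      have hsk := hs j.toNat hjlt
      have hcast : ((j.toNat : Int)) = j := by omega
      rw [hcast] at hsk
      have := ih (j - sol.getD j.toNat 0) (by omega) (by omega) (by omega)
      simp only [jumpB, if_pos hc]
      omega
    · simp only [jumpB, if_neg hc]; omega

lemma chain_fuel (arr sol : List Int) (hs : goodSol sol) :
    ∀ (f f' : Nat) (j : Int), -1 ≤ j → j < (sol.length : Int) →
      j + 1 ≤ (f : Int) → j + 1 ≤ (f' : Int) →
      chain arr sol f j = chain arr sol f' j := by
  intro f
  induction f with
  | zero =>
    intro f' j h1 h2 h3 h4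
    have : j < 0 := by omega
    rw [chain_neg _ _ _ _ this, chain_neg _ _ _ _ this]
  | succ f ih =>
    intro f' j h1 h2 h3 h4
    by_cases hj : 0 ≤ j
    · have hf' : ∃ f1, f' = f1 + 1 := by cases f' with | zero => omega | succ k => exact ⟨k, rfl⟩
      obtain ⟨f1, rfl⟩ := hf'
      have hjlt : j.toNat < sol.length := by omega
      have hsk := hs j.toNat hjlt
      have hcast : ((j.toNat : Int)) = j := by omega
      rw [hcast] at hsk
      simp only [chain, if_pos hj]
      rw [ih f1 (j - sol.getD j.toNat 0) (by omega) (by omega) (by omega) (by omega)]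
    · have : j < 0 := by omega
      rw [chain_neg _ _ _ _ this, chain_neg _ _ _ _ this]

lemma chain_congr (arr sol t : List Int) (hs : goodSol sol) :
    ∀ (f : Nat) (j : Int), -1 ≤ j → j < (sol.length : Int) →
      chain arr (sol ++ t) f j = chain arr sol f j := by
  intro f
  induction f with
  | zero => intro j _ _; rfl
  | succ f ih =>
    intro j h1 h2
    by_cases hj : 0 ≤ j
    · have hjlt : j.toNat < sol.length := by omega
      have hsk := hs j.toNat hjlt
      have hcast : ((j.toNat : Int)) = j := by omega
      rw [hcast] at hsk
      have hget : (sol ++ t).getD j.toNat 0 = sol.getD j.toNat 0 := by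
        simp [List.getD, List.getElem?_append_left hjlt]
      simp only [chain, if_pos hj, hget]
      rw [ih (j - sol.getD j.toNat 0) (by omega) (by omega)]
    · have : j < 0 := by omega
      rw [chain_neg _ _ _ _ this, chain_neg _ _ _ _ this]

lemma pop_chain (arr sol : List Int) (flag a : Int) (hs : goodSol sol) :
    ∀ (g : Nat) (f : Nat) (j : Int), -1 ≤ j → j < (sol.length : Int) →
      j + 1 ≤ (f : Int) → j + 1 ≤ (g : Int) →
      popLoopA flag a (chain arr sol f j) = chain arr sol f (jumpB arr flag a sol g j) := by
  intro g
  induction g with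
  | zero =>
    intro f j h1 h2 h3 h4
    have hneg : j < 0 := by omega
    rw [jumpB, chain_neg _ _ _ _ hneg]; rfl
  | succ g ih =>
    intro f j h1 h2 h3 h4
    by_cases hj : 0 ≤ j
    · have hf : ∃ f1, f = f1 + 1 := by cases f with | zero => omega | succ k => exact ⟨k, rfl⟩
      obtain ⟨f1, rfl⟩ := hf
      have hjlt : j.toNat < sol.length := by omega
      have hsk := hs j.toNat hjlt
      have hcast : ((j.toNat : Int)) = j := by omega
      rw [hcast] at hsk
      by_cases hc : arr.getD j.toNat 0 + flag > a
      · have hcond : 0 ≤ j ∧ arr.getD j.toNat 0 + flag > a := ⟨hj, hc⟩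
        simp only [chain, if_pos hj, popLoopA, if_pos hc, jumpB, if_pos hcond]
        set j' := j - sol.getD j.toNat 0 with hj'
        have h1' : -1 ≤ j' := by omega
        have h2' : j' < (sol.length : Int) := by omega
        rw [ih f1 j' h1' h2' (by omega) (by omega)]
        have hb := jump_bounds arr sol flag a hs g j' h1' h2' (by omega)
        exact chain_fuel arr sol hs f1 (f1 + 1)
          (jumpB arr flag a sol g j') (by omega) (by omega) (by omega) (by omega)
      · have hcond : ¬ (0 ≤ j ∧ arr.getD j.toNat 0 + flag > a) := by tauto
        simp only [chain, if_pos hj, popLoopA, if_neg hc, jumpB, if_neg hcond]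
      -- done
    · have hneg : j < 0 := by omega
      rw [jump_neg _ _ _ _ _ _ hneg, chain_neg _ _ _ _ hneg]; rfl

lemma getD_concat_length (l : List Int) (x d : Int) : (l ++ [x]).getD l.length d = x := by
  simp [List.getD]

lemma set_append_length (l1 l2 : List Int) (x : Int) :
    (l1 ++ l2).set l1.length x = l1 ++ l2.set 0 x := by
  induction l1 with
  | nil => rfl
  | cons h t ih => simp [ih]

lemma main_inv (arr : List Int) (flag : Int) :
    ∀ i : Nat, i ≤ arr.length →
      (((List.range i).foldl (stepA arr flag) ([], List.replicate arr.length 0)).1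
        = chain arr ((List.range i).foldl (stepB arr flag) []) i ((i : Int) - 1))
      ∧ (((List.range i).foldl (stepA arr flag) ([], List.replicate arr.length 0)).2
        = ((List.range i).foldl (stepB arr flag) []) ++ List.replicate (arr.length - i) 0)
      ∧ ((List.range i).foldl (stepB arr flag) []).length = i
      ∧ goodSol ((List.range i).foldl (stepB arr flag) []) := by
  intro i
  induction i with
  | zero =>
    intro _
    refine ⟨rfl, by simp, rfl, ?_⟩
    intro k hk; simp at hk
  | succ i ih =>
    intro hle
    have hi : i < arr.length := by omega
    obtain ⟨hstk, hsol, hlen, hgood⟩ := ih (by omega)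
    set sol := (List.range i).foldl (stepB arr flag) [] with hsoldef
    set a := arr.getD i 0 with hadef
    set jres := jumpB arr flag a sol i ((i : Int) - 1) with hjdef
    have hlenZ : (sol.length : Int) = (i : Int) := by rw [hlen]
    have hjb : -1 ≤ jres ∧ jres ≤ (i : Int) - 1 := by
      have := jump_bounds arr sol flag a hgood i ((i : Int) - 1) (by omega) (by omega) (by omega)
      omega
    have hms : popLoopA flag a (chain arr sol i ((i : Int) - 1)) = chain arr sol i jres := by
      exact pop_chain arr sol flag a hgood i i ((i : Int) - 1) (by omega) (by omega)
        (by omega) (by omega)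
    -- the computed max_till equals i - jres in both branches of A's if
    have hmax : (match chain arr sol i jres with
        | (j, _) :: _ => (i : Int) - j
        | [] => (i : Int) + 1) = (i : Int) - jres := by
      by_cases hjn : 0 ≤ jres
      · have hf : ∃ f1, i = f1 + 1 := by
          cases i with | zero => omega | succ k => exact ⟨k, rfl⟩
        obtain ⟨f1, hfeq⟩ := hf
        rw [hfeq]
        simp only [chain, if_pos hjn]
      · have : jres = -1 := by omega
        rw [this, chain_neg _ _ _ _ (by omega)]
        simp
    set sol' := sol ++ [(i : Int) - jres] with hsol'def
    have hB : (List.range (i + 1)).foldl (stepB arr flag) [] = sol' := by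
      rw [List.range_succ, List.foldl_append]
      simp only [List.foldl_cons, List.foldl_nil, ← hsoldef]
      simp only [stepB, ← hadef, ← hjdef, hsol'def]
    have hA : (List.range (i + 1)).foldl (stepA arr flag) ([], List.replicate arr.length 0)
        = stepA arr flag ((List.range i).foldl (stepA arr flag) ([], List.replicate arr.length 0)) i := by
      rw [List.range_succ, List.foldl_append]; rfl
    have hgood' : goodSol sol' := by
      intro k hk
      rw [hsol'def] at hk ⊢
      simp only [List.length_append, List.length_cons, List.length_nil, hlen] at hk
      by_cases hki : k < sol.length
      · have : (sol ++ [(i : Int) - jres]).getD k 0 = sol.getD k 0 := by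
          simp [List.getD, List.getElem?_append_left hki]
        rw [this]; exact hgood k hki
      · have hkeq : k = sol.length := by omega
        rw [hkeq, getD_concat_length]
        have : ((sol.length : Int)) = (i : Int) := hlenZ
        omega
    refine ⟨?_, ?_, ?_, ?_⟩
    · -- stack
      rw [hA, hB]
      simp only [stepA, hstk, ← hadef, hms]
      have hcast : ((i : Int)).toNat = i := by omega
      have hpush : chain arr sol' (i + 1) (((i + 1 : Nat) : Int) - 1)
          = ((i : Int), a) :: chain arr sol' i jres := by
        have h1 : ((i + 1 : Nat) : Int) - 1 = (i : Int) := by push_cast; ring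
        rw [h1]
        simp only [chain, if_pos (by omega : (0:Int) ≤ (i : Int)), hcast]
        have hgi : sol'.getD i 0 = (i : Int) - jres := by
          rw [hsol'def, ← hlen, getD_concat_length]
        rw [hgi, hadef]
        have : (i : Int) - ((i : Int) - jres) = jres := by omega
        rw [this]
      rw [hpush, hsol'def,
        chain_congr arr sol [(i : Int) - jres] hgood i jres (by omega) (by omega)]
    · -- solution list
      rw [hA, hB]
      simp only [stepA, hsol, hstk, ← hadef, hms, hmax]
      have hrep : List.replicate (arr.length - i) (0 : Int)
          = 0 :: List.replicate (arr.length - (i + 1)) 0 := by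
        have : arr.length - i = (arr.length - (i + 1)) + 1 := by omega
        rw [this, List.replicate_succ]
      rw [hrep, ← hlen, set_append_length]
      simp [hsol'def, hlen]
    · rw [hB, hsol'def]; simp [hlen]
    · rw [hB]; exact hgood'

-- ===== VERDICT (by name: the statement is the Claim_ definition above) =====
theorem getMinCount_spec : Claim_equal_getMinCount := by
  intro arr flag _
  unfold Spec_getMinCount getMinCount getMinCount_alt
  have h := (main_inv arr flag arr.length (le_refl _)).2.1
  rw [h]
  simp
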